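-- pv_equiv track=rewrite | github.com/wang-mengdi/ValueRangeAnalyzer | Parser.py | get_func_call_list
-- ===== SOURCE A (Python) =====
-- def get_func_call_list(fun_pref,tokens): # tokens is like [a,b,c]...
--     args=[]
--     while ',' in tokens:
--         k=tokens.index(',')
--         s=tokens[:k]
--         t=s[0]
--         if 'D' in s:
--             t=t.split('_')[0] # means it's from arg list
--         args.append(fun_pref+t)
--         tokens=tokens[k+1:]
--     s=tokens
--     t=s[0]
--     if 'D' in s:
--         t=t.split('_')[0] # means it's from arg list
--     args.append(fun_pref+t)
--     return args
-- ===== SOURCE B (Python) =====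
-- def get_func_call_list(fun_pref, tokens):
--     # Single pass: per segment keep only its first token and whether it contains 'D',
--     # instead of repeatedly searching for ',' and re-slicing the list.
--     args = []
--     first = None
--     has_d = False
--     for tok in tokens:
--         if tok == ',':
--             t = first.split('_')[0] if has_d else first
--             args.append(fun_pref + t)
--             first = None
--             has_d = False
--         else:
--             if first is None:
--                 first = tok
--             has_d = has_d or tok == 'D'
--     t = first.split('_')[0] if has_d else first
--     args.append(fun_pref + t)
--     return args
-- ===== Notes on version B (the rewrite author's own statement) =====
-- stated objective: alternative
-- what changed: Instead of repeatedly searching for the next ',' and re-slicing the remaining token list each round, B makes one left-to-right pass keeping only the current segment's first token and a has-'D' flag, emitting an arg at each comma (same measured cost: A's per-round scans are C-level primitives).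
-- outside the precondition, e.g. on get_func_call_list('f_', []): A raises IndexError, B raises TypeError; on get_func_call_list('f_', ['a', ',']): A raises IndexError, B raises TypeError; on get_func_call_list('f_', [',', 'a']): A raises IndexError, B raises TypeError
import Mathlib
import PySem

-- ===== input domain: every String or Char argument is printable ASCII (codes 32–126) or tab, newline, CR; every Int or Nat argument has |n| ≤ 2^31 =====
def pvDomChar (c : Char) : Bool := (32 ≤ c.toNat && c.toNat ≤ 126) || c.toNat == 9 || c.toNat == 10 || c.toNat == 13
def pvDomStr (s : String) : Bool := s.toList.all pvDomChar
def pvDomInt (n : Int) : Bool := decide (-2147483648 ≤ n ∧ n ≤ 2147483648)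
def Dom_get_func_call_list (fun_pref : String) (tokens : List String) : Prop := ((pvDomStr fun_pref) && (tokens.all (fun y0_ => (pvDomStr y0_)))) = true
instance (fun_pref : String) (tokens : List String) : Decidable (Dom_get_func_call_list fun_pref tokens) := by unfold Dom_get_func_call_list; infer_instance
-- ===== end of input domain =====

-- B replaces A's repeated "find the next ',' then re-slice" passes by one left-to-right
-- pass that keeps, per segment, only its first token and whether it contains 'D' (objective: alternative single-pass algorithm).

-- ===== PORT A =====
-- A's while loop: find the ',' index, process the slice before it, continue on the slice after it.
-- t.split('_')[0] is ported as pyGetD ((split? t "_").getD []) 0 "": split? is `some` (the separator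
-- is nonempty) and its result is nonempty, so both defaults are never used — exact.
def get_func_call_list_loop (fun_pref : String) (tokens : List String) (args : List String) : List String :=
  match h : PySem.List.index? tokens "," with
  | some k =>
      let s := PySem.List.slice tokens none (some (k : Int))        -- tokens[:k]
      let t := PySem.List.pyGetD s 0 ""                              -- s[0]; Pre_ excludes the empty segment (IndexError)
      let t := if "D" ∈ s then PySem.List.pyGetD ((PySem.Str.split? t "_").getD []) 0 "" else t
      get_func_call_list_loop fun_pref (PySem.List.slice tokens (some ((k : Int) + 1)) none) (args ++ [fun_pref ++ t])  -- tokens[k+1:]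
  | none =>
      let s := tokens
      let t := PySem.List.pyGetD s 0 ""                              -- s[0]; Pre_ excludes the empty segment (IndexError)
      let t := if "D" ∈ s then PySem.List.pyGetD ((PySem.Str.split? t "_").getD []) 0 "" else t
      args ++ [fun_pref ++ t]
termination_by tokens.length
decreasing_by
  have hmem : "," ∈ tokens := (PySem.List.index?_isSome_iff tokens ",").mp (by rw [h]; rfl)
  have hpos : 0 < tokens.length := List.length_pos_of_mem hmem
  have heq : PySem.List.slice tokens (some ((k : Int) + 1)) none = tokens.drop (k + 1) := by
    have h1 : ((k : Int) + 1) = ((k + 1 : Nat) : Int) := by push_cast; ring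
    rw [h1]; exact PySem.List.slice_from_natCast tokens (k + 1)
  simp [heq]
  omega

def get_func_call_list (fun_pref : String) (tokens : List String) : List String :=
  get_func_call_list_loop fun_pref tokens []

-- ===== PORT B =====
-- B's per-token step on state (args, first token of the current segment, seen a 'D' in it).
def get_func_call_list_alt_emit (fun_pref : String) (first : Option String) (hasD : Bool) : String :=
  -- Python's `first.split('_')[0] if has_d else first`; `first.getD ""` stands for `first`,
  -- which Pre_ guarantees is not None here.
  let t := if hasD then PySem.List.pyGetD ((PySem.Str.split? (first.getD "") "_").getD []) 0 "" else first.getD ""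
  fun_pref ++ t

def get_func_call_list_alt_step (st : List String × Option String × Bool) (tok : String)
    (fun_pref : String) : List String × Option String × Bool :=
  if tok = "," then
    (st.1 ++ [get_func_call_list_alt_emit fun_pref st.2.1 st.2.2], none, false)
  else
    (st.1, (if st.2.1 = none then some tok else st.2.1), st.2.2 || (tok == "D"))

def get_func_call_list_alt (fun_pref : String) (tokens : List String) : List String :=
  let st := tokens.foldl (fun st tok => get_func_call_list_alt_step st tok fun_pref) ([], none, false)
  st.1 ++ [get_func_call_list_alt_emit fun_pref st.2.1 st.2.2]

-- ===== PRECONDITION & SPEC =====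
-- Pre_ excludes exactly the inputs whose comma-split has an empty segment (empty token list,
-- a leading or trailing ',' or two adjacent ','): there Python A raises IndexError on s[0].
def Pre_get_func_call_list (fun_pref : String) (tokens : List String) : Prop :=
  tokens ≠ [] ∧ tokens.head? ≠ some "," ∧ tokens.getLast? ≠ some "," ∧
    List.IsChain (fun a b => ¬(a = "," ∧ b = ",")) tokens
instance (fun_pref : String) (tokens : List String) : Decidable (Pre_get_func_call_list fun_pref tokens) := by unfold Pre_get_func_call_list; infer_instance

def pvWitness_get_func_call_list : String × List String := ("f_", ["a", "b", ",", "D", "x_1", ",", "c_2"])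

def Spec_get_func_call_list (fun_pref : String) (tokens : List String) (out : List String) : Prop := out = get_func_call_list_alt fun_pref tokens
instance (fun_pref : String) (tokens : List String) (out : List String) : Decidable (Spec_get_func_call_list fun_pref tokens out) := by unfold Spec_get_func_call_list; infer_instance

-- ===== CLAIM (what is proved, stated in full; the proofs are below) =====
def Claim_equal_get_func_call_list : Prop := ∀ (fun_pref : String) (tokens : List String), Dom_get_func_call_list fun_pref tokens → Pre_get_func_call_list fun_pref tokens → Spec_get_func_call_list fun_pref tokens (get_func_call_list fun_pref tokens)

-- ===== LEMMAS AND PROOFS =====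

theorem alt_step_comma (fun_pref : String) (a : List String) (f : Option String) (d : Bool) :
    get_func_call_list_alt_step (a, f, d) "," fun_pref
      = (a ++ [get_func_call_list_alt_emit fun_pref f d], none, false) := by
  simp [get_func_call_list_alt_step]

theorem alt_step_other_some (fun_pref tok x : String) (a : List String) (d : Bool)
    (h : tok ≠ ",") :
    get_func_call_list_alt_step (a, some x, d) tok fun_pref
      = (a, some x, d || (tok == "D")) := by
  simp [get_func_call_list_alt_step, h]

theorem alt_step_other_none (fun_pref tok : String) (a : List String) (d : Bool)
    (h : tok ≠ ",") :
    get_func_call_list_alt_step (a, none, d) tok fun_pref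
      = (a, some tok, d || (tok == "D")) := by
  simp [get_func_call_list_alt_step, h]

-- Folding B's step over a comma-free tail once the first token is fixed only accumulates the 'D' flag.
theorem alt_foldl_commafree_some (fun_pref x : String) (args : List String)
    (pre : List String) : ∀ (b : Bool), "," ∉ pre →
    pre.foldl (fun st tok => get_func_call_list_alt_step st tok fun_pref) (args, some x, b)
      = (args, some x, b || decide ("D" ∈ pre)) := by
  induction pre with
  | nil => intro b _; simp
  | cons y ys ih =>
      intro b hpre
      have hy : y ≠ "," := fun h => hpre (h ▸ List.mem_cons_self)
      have hys : "," ∉ ys := fun h => hpre (List.mem_cons_of_mem _ h)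
      rw [List.foldl_cons, alt_step_other_some fun_pref y x args b hy]
      rw [ih (b || (y == "D")) hys]
      simp [List.mem_cons, Bool.or_assoc, beq_eq_decide, eq_comm]

-- Folding B's step over a nonempty comma-free segment from a fresh state records its head and its 'D' flag.
theorem alt_foldl_commafree (fun_pref : String) (args : List String)
    (x : String) (ys : List String) (hpre : "," ∉ x :: ys) :
    (x :: ys).foldl (fun st tok => get_func_call_list_alt_step st tok fun_pref) (args, none, false)
      = (args, some x, decide ("D" ∈ x :: ys)) := by
  have hx : x ≠ "," := fun h => hpre (h ▸ List.mem_cons_self)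
  have hys : "," ∉ ys := fun h => hpre (List.mem_cons_of_mem _ h)
  rw [List.foldl_cons, alt_step_other_none fun_pref x args false hx]
  rw [alt_foldl_commafree_some fun_pref x args ys (false || (x == "D")) hys]
  simp [List.mem_cons, beq_eq_decide, eq_comm]

-- B's emit on (head, 'D'-flag) of a nonempty segment is A's per-segment value.
theorem emit_eq (fun_pref x : String) (ys : List String) :
    get_func_call_list_alt_emit fun_pref (some x) (decide ("D" ∈ x :: ys))
      = fun_pref ++ (if "D" ∈ x :: ys then PySem.List.pyGetD ((PySem.Str.split? x "_").getD []) 0 "" else x) := by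
  simp only [get_func_call_list_alt_emit, Option.getD_some]
  by_cases h : "D" ∈ x :: ys <;> simp [h]

-- A's loop equals B's fold, for any accumulated args, on token lists with no empty segment.
theorem loop_eq_alt (fun_pref : String) : ∀ (tokens : List String),
    tokens ≠ [] → tokens.getLast? ≠ some "," →
    List.IsChain (fun a b => ¬(a = "," ∧ b = ",")) tokens → tokens.head? ≠ some "," →
    ∀ (args : List String),
      get_func_call_list_loop fun_pref tokens args
        = (let st := tokens.foldl (fun st tok => get_func_call_list_alt_step st tok fun_pref) (args, none, false)
           st.1 ++ [get_func_call_list_alt_emit fun_pref st.2.1 st.2.2]) := by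
  intro tokens
  induction hn : tokens.length using Nat.strong_induction_on generalizing tokens with
  | _ n ih =>
  intro hne hlast hchain hhead args
  rw [get_func_call_list_loop]
  split
  case _ k heq =>
      obtain ⟨pre, rest, hdecomp, hlen, hnotin⟩ := (PySem.List.index?_eq_some_iff tokens "," k).mp heq
      subst hdecomp
      obtain ⟨x, ys, rfl⟩ : ∃ x ys, pre = x :: ys := by
        cases pre with
        | nil => simp at hhead
        | cons x ys => exact ⟨x, ys, rfl⟩
      obtain ⟨r, rs, rfl⟩ : ∃ r rs, rest = r :: rs := by
        cases rest with
        | nil => rw [List.getLast?_append] at hlast; exact absurd rfl hlast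
        | cons r rs => exact ⟨r, rs, rfl⟩
      have hslice_take : PySem.List.slice ((x :: ys) ++ "," :: r :: rs) none (some (k : Int))
          = x :: ys := by
        rw [PySem.List.slice_to_natCast, ← hlen, List.take_left]
      have hslice_drop : PySem.List.slice ((x :: ys) ++ "," :: r :: rs) (some ((k : Int) + 1)) none
          = r :: rs := by
        have h1 : ((k : Int) + 1) = ((k + 1 : Nat) : Int) := by push_cast; ring
        rw [h1, PySem.List.slice_from_natCast, ← hlen]
        rw [show (x :: ys) ++ "," :: r :: rs = ((x :: ys) ++ [","]) ++ r :: rs by simp]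
        rw [List.drop_left' (by simp)]
      simp only [hslice_take, hslice_drop, PySem.List.pyGetD_zero_cons]
      -- facts about the remainder, for the induction hypothesis
      have hchain2 : List.IsChain (fun a b => ¬(a = "," ∧ b = ",")) ("," :: r :: rs) :=
        (List.isChain_append.mp hchain).2.1
      have hrhead : r ≠ "," := by
        have := (List.isChain_cons_cons.mp hchain2).1
        intro h; exact this ⟨rfl, h⟩
      have hrlast : (r :: rs).getLast? ≠ some "," := by
        rw [List.getLast?_append] at hlast
        simpa using hlast
      have hrest := ih (r :: rs).length
        (by subst hn; simp; omega) (r :: rs) rfl (by simp) hrlast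
        ((List.isChain_cons_cons.mp hchain2).2) (by simpa using hrhead)
        (args ++ [fun_pref ++ (if "D" ∈ x :: ys then PySem.List.pyGetD ((PySem.Str.split? x "_").getD []) 0 "" else x)])
      rw [hrest, List.foldl_append, alt_foldl_commafree fun_pref args x ys hnotin]
      -- B side: fold over the segment, then the comma, then the rest
      simp only [List.foldl_cons, alt_step_comma, emit_eq]
  case _ heq =>
      have hnotin : "," ∉ tokens := (PySem.List.index?_eq_none_iff tokens ",").mp heq
      obtain ⟨x, ys, rfl⟩ : ∃ x ys, tokens = x :: ys := by
        cases tokens with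
        | nil => exact absurd rfl hne
        | cons x ys => exact ⟨x, ys, rfl⟩
      rw [alt_foldl_commafree fun_pref args x ys hnotin]
      simp only [PySem.List.pyGetD_zero_cons]
      rw [emit_eq]

-- ===== VERDICT (by name: the statement is the Claim_ definition above) =====
theorem get_func_call_list_spec : Claim_equal_get_func_call_list := by
  intro fun_pref tokens _ hpre
  obtain ⟨hne, hhead, hlast, hchain⟩ := hpre
  unfold Spec_get_func_call_list get_func_call_list get_func_call_list_alt
  exact loop_eq_alt fun_pref tokens hne hlast hchain hhead []
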